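-- pv_equiv track=rewrite | github.com/BoZhaoUT/Teaching | Fall_2015_CSCA08/Week-11/week11_template.py | remove_dup_values
-- ===== SOURCE A (Python) =====
-- def remove_dup_values(my_dictionary):
--     ''' (dict of {int: int}) -> int
--     Remove all entries of my dictionary whose values are not unique in the
--     dictionary. Return the number of entries that were removed.
--     '''
--
--
--
--
--
--
--
--
--
--
--
--
--
--     # detail implementation
--     dictionary_values = list(my_dictionary.values())
--     key_delete = []
--     count = 0
--     for (next_key, next_value) in my_dictionary.items():
--         if dictionary_values.count(next_value) > 1:
--             key_delete.append(next_key)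
--             count += 1
--     for next_key in key_delete:
--         del my_dictionary[next_key]
--     return count
-- ===== SOURCE B (Python) =====
-- def remove_dup_values(my_dictionary):
--     ''' (dict of {int: int}) -> int
--     Remove all entries of my dictionary whose values are not unique in the
--     dictionary. Return the number of entries that were removed.
--     '''
--     groups = {}
--     for key, value in my_dictionary.items():
--         groups.setdefault(value, []).append(key)
--     count = 0
--     for value, keys in groups.items():
--         if len(keys) > 1:
--             for key in keys:
--                 del my_dictionary[key]
--             count += len(keys)
--     return count
-- ===== Notes on version B (the rewrite author's own statement) =====
-- stated objective: faster
-- what changed: B builds an inverted index value->list-of-keys in one pass and counts/deletes whole duplicate groups by iterating over the value groups, instead of A's per-entry list.count scan over the values list.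
import Mathlib
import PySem

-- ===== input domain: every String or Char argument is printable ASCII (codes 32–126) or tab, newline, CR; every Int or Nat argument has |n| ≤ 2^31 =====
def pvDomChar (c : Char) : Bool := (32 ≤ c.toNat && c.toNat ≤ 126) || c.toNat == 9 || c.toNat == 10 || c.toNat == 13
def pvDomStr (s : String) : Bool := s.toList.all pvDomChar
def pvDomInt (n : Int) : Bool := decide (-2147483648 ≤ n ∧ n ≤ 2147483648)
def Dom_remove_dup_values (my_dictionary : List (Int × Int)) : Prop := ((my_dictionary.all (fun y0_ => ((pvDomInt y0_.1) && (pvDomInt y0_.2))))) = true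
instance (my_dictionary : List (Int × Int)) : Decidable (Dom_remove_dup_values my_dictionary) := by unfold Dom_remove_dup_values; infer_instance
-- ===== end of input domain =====

-- B groups keys by value in one dict pass and counts whole duplicate groups (simpler, no per-entry list.count scan).
-- Both A and B mutate the dict in place identically; the equivalence proved here is about the RETURN value only.

-- ===== PORT A =====
-- A's deletion loop only mutates the argument; the returned count is computed before it, so it is not part of the port.
def remove_dup_values (my_dictionary : List (Int × Int)) : Int :=
  let d := PySem.Dict.ofList my_dictionary
  let dictionary_values := d.values
  let r := d.items.foldl
    (fun (st : List Int × Int) p =>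
      if 1 < dictionary_values.count p.2 then (st.1 ++ [p.1], st.2 + 1) else st)
    ([], 0)
  r.2

-- ===== PORT B =====
def remove_dup_values_alt (my_dictionary : List (Int × Int)) : Int :=
  let d := PySem.Dict.ofList my_dictionary
  let groups := d.items.foldl
    (fun (g : PySem.Dict Int (List Int)) p => g.modify p.2 [] (· ++ [p.1]))
    PySem.Dict.empty
  groups.items.foldl
    (fun (count : Int) q => if 1 < q.2.length then count + q.2.length else count)
    0

-- ===== PRECONDITION & SPEC =====
def Spec_remove_dup_values (my_dictionary : List (Int × Int)) (out : Int) : Prop := out = remove_dup_values_alt my_dictionary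
instance (my_dictionary : List (Int × Int)) (out : Int) : Decidable (Spec_remove_dup_values my_dictionary out) := by unfold Spec_remove_dup_values; infer_instance

-- ===== CLAIM (what is proved, stated in full; the proofs are below) =====
def Claim_equal_remove_dup_values : Prop := ∀ (my_dictionary : List (Int × Int)), Dom_remove_dup_values my_dictionary → Spec_remove_dup_values my_dictionary (remove_dup_values my_dictionary)

-- ===== LEMMAS AND PROOFS =====

-- A's loop counts the entries whose value is non-unique.
theorem foldlA_snd (vals : List Int) (L : List (Int × Int)) (kd : List Int) (c : Int) :
    (L.foldl
      (fun (st : List Int × Int) p =>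
        if 1 < vals.count p.2 then (st.1 ++ [p.1], st.2 + 1) else st)
      (kd, c)).2 = c + (L.countP (fun p => 1 < vals.count p.2) : Int) := by
  induction L generalizing kd c with
  | nil => simp
  | cons p L ih =>
    simp only [List.foldl_cons, List.countP_cons]
    by_cases h : 1 < vals.count p.2
    · simp [h, ih]; ring
    · simp [h, ih]

-- B's counting loop is a sum over the group list.
theorem foldlB_sum (L : List (Int × List Int)) (c : Int) :
    L.foldl (fun (count : Int) q => if 1 < q.2.length then count + q.2.length else count) c
      = c + (L.map (fun q => if 1 < q.2.length then (q.2.length : Int) else 0)).sum := by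
  induction L generalizing c with
  | nil => simp
  | cons q L ih =>
    simp only [List.foldl_cons, List.map_cons, List.sum_cons]
    by_cases h : 1 < q.2.length
    · simp [h, ih]; ring
    · simp [h, ih]

-- Counting elements with a non-unique-count predicate equals summing group sizes over any
-- nodup covering list of values.
theorem count_group_sum (vs : List Int) (ds : List Int) (hnd : ds.Nodup)
    (hsub : ∀ v ∈ vs, v ∈ ds) :
    (vs.countP (fun v => 1 < vs.count v) : Int)
      = (ds.map (fun d => if 1 < vs.count d then (vs.count d : Int) else 0)).sum := by
  induction ds generalizing vs with
  | nil =>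
    have hv : vs = [] := by
      cases vs with
      | nil => rfl
      | cons a t => exact absurd (hsub a (by simp)) (by simp)
    simp [hv]
  | cons d ds ih =>
    have hnd' := hnd.of_cons
    have hdd : d ∉ ds := (List.nodup_cons.1 hnd).1
    set vs2 := vs.filter (fun v => !(v == d)) with hvs2
    have hcnt : ∀ v, v ≠ d → vs2.count v = vs.count v := by
      intro v hv
      exact List.count_filter (by simp [hv])
    have hsplit := List.countP_eq_countP_filter_add vs
      (fun v => decide (1 < vs.count v)) (fun v => v == d)
    have h1 : (vs.filter (fun v => v == d)).countP (fun v => decide (1 < vs.count v))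
        = if 1 < vs.count d then vs.count d else 0 := by
      rw [List.filter_beq, List.countP_replicate]
      by_cases h : 1 < vs.count d <;> simp [h]
    have h2 : vs2.countP (fun v => decide (1 < vs.count v))
        = vs2.countP (fun v => decide (1 < vs2.count v)) := by
      apply List.countP_congr
      intro v hv
      have : v ≠ d := by have := (List.mem_filter.1 hv).2; simpa using this
      simp [hcnt v this]
    have hsub2 : ∀ v ∈ vs2, v ∈ ds := by
      intro v hv
      have hvd : v ≠ d := by have := (List.mem_filter.1 hv).2; simpa using this
      have := hsub v (List.mem_of_mem_filter hv)
      simp at this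
      tauto
    have hih := ih vs2 hnd' hsub2
    have hmap : (ds.map (fun d' => if 1 < vs2.count d' then (vs2.count d' : Int) else 0))
        = ds.map (fun d' => if 1 < vs.count d' then (vs.count d' : Int) else 0) := by
      apply List.map_congr_left
      intro d' hd'
      have : d' ≠ d := fun h => hdd (h ▸ hd')
      rw [hcnt d' this]
    rw [hmap] at hih
    simp only [List.map_cons, List.sum_cons]
    rw [hsplit, h1, h2]
    push_cast
    rw [hih]

-- B's group for value v holds exactly the keys of the entries with that value.
theorem getD_groups (L : List (Int × Int)) (v : Int) :
    ((L.foldl (fun (g : PySem.Dict Int (List Int)) p => g.modify p.2 [] (· ++ [p.1]))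
        PySem.Dict.empty).getD v [])
      = (L.filter (fun p => p.2 == v)).map (·.1) := by
  have h := PySem.Dict.getD_foldl_modify_append (L.map (fun p => (p.2, p.1)))
    (PySem.Dict.empty : PySem.Dict Int (List Int)) v
  rw [List.foldl_map] at h
  simpa [List.filter_map, List.map_map, Function.comp] using h

theorem remove_dup_values_spec : Claim_equal_remove_dup_values := by
  intro my_dictionary _
  unfold Spec_remove_dup_values remove_dup_values remove_dup_values_alt
  set L := (PySem.Dict.ofList my_dictionary).items with hL
  set vals := (PySem.Dict.ofList my_dictionary).values with hvals
  have hvalsL : vals = L.map (·.2) := rfl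
  set g := L.foldl (fun (g : PySem.Dict Int (List Int)) p => g.modify p.2 [] (· ++ [p.1]))
      PySem.Dict.empty with hg
  -- keys of the group dict: the distinct values, in first-occurrence order
  have hkeys : g.keys = PySem.Set.ofList vals := by
    rw [hg, PySem.Dict.keys_foldl_modify_key L (·.2) [] (fun _ p => (· ++ [p.1]))]
    simp [PySem.Set.update_nil_left, hvalsL]
  have hnk : g.keys.Nodup := by rw [hkeys]; exact PySem.Set.nodup_ofList vals
  -- left side: A's loop
  rw [foldlA_snd]
  -- right side: B's loop as a sum over the groups
  rw [foldlB_sum, PySem.Dict.items_eq_map_keys g hnk [], List.map_map]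
  have hlen : ∀ v, (g.getD v []).length = vals.count v := by
    intro v
    rw [hg, getD_groups, List.length_map, ← List.countP_eq_length_filter,
      hvalsL, List.count_eq_countP, List.countP_map]
    rfl
  have hmap : (g.keys.map (fun v => if 1 < (g.getD v []).length then ((g.getD v []).length : Int) else 0))
      = g.keys.map (fun v => if 1 < vals.count v then (vals.count v : Int) else 0) := by
    apply List.map_congr_left
    intro v _
    rw [hlen v]
  have hcountP : L.countP (fun p => decide (1 < vals.count p.2))
      = vals.countP (fun v => decide (1 < vals.count v)) := by
    rw [hvalsL, List.countP_map]; rfl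
  have := count_group_sum vals g.keys hnk
    (by intro v hv; rw [hkeys]; exact (PySem.Set.mem_ofList vals v).2 hv)
  simp only [Function.comp_def]
  rw [← hL, ← hvals, hmap, hcountP, zero_add, zero_add, this]
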